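-- pv_equiv track=rewrite | github.com/arielst86/pad-job-analyzer | app.py | sentence_bounds
-- ===== SOURCE A (Python) =====
-- from typing import Tuple, Dict, List, Any, Optional
--
-- def sentence_bounds(text: str, start: int, end: int) -> Tuple[int, int]:
--     left = max(text.rfind(".", 0, start), text.rfind("?", 0, start), text.rfind("!", 0, start))
--     right_candidates = [text.find(".", end), text.find("?", end), text.find("!", end)]
--     right_candidates = [c for c in right_candidates if c != -1]
--     right = min(right_candidates) + 1 if right_candidates else len(text)
--     if left == -1:
--         left = 0
--     else:
--         left += 1
--     return (left, right)
-- ===== SOURCE B (Python) =====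
-- # B: builds a sorted index of all sentence-terminator positions in one pass,
-- # then answers both bounds with hand-written binary searches on that index,
-- # instead of three rfind + three find library scans reduced with max/min.
-- def sentence_bounds(text, start, end):
--     n = len(text)
--     pos = [i for i, c in enumerate(text) if c in ".?!"]
--     s = start + n if start < 0 else start
--     s = 0 if s < 0 else (n if n < s else s)
--     e = end + n if end < 0 else end
--     e = 0 if e < 0 else (n if n < e else e)
--     lo, hi = 0, len(pos)
--     while lo < hi:
--         mid = (lo + hi) // 2
--         if pos[mid] < s:
--             lo = mid + 1
--         else:
--             hi = mid
--     left = pos[lo - 1] + 1 if lo > 0 else 0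
--     lo2, hi2 = 0, len(pos)
--     while lo2 < hi2:
--         mid = (lo2 + hi2) // 2
--         if pos[mid] < e:
--             lo2 = mid + 1
--         else:
--             hi2 = mid
--     right = pos[lo2] + 1 if lo2 < len(pos) else n
--     return (left, right)
-- ===== Notes on version B (the rewrite author's own statement) =====
-- stated objective: alternative
-- what changed: Replaces A's six substring searches (three rfind and three find, reduced with max/min) by one enumeration pass that builds a sorted index of all terminator positions, then answers both bounds with hand-written binary searches on that index.
import Mathlib
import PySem

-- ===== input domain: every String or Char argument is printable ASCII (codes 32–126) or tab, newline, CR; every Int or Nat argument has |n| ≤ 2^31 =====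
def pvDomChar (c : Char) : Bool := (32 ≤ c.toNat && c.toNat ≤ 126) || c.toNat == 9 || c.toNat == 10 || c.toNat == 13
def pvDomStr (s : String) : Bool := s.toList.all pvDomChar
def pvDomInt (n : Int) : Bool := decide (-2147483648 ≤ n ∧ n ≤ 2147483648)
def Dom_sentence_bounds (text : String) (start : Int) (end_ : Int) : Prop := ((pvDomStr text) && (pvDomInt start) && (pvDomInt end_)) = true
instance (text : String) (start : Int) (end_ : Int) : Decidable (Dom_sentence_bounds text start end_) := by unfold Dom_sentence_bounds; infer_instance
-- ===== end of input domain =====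

-- B builds a sorted index of all '.?!' positions in one pass and answers both bounds
-- by hand-written binary searches on that index, instead of A's three rfind + three
-- find scans reduced with max/min (alternative decomposition; no speed claim).

-- ===== PORT A =====
def sentence_bounds (text : String) (start : Int) (end_ : Int) : Int × Int :=
  let left := max (max (PySem.Str.rfindFrom text "." 0 (some start))
                       (PySem.Str.rfindFrom text "?" 0 (some start)))
                  (PySem.Str.rfindFrom text "!" 0 (some start))
  let right_candidates := [PySem.Str.findFrom text "." end_,
                           PySem.Str.findFrom text "?" end_,
                           PySem.Str.findFrom text "!" end_]
  let right_candidates := right_candidates.filter (fun c => c ≠ -1)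
  -- "min(right_candidates) + 1 if right_candidates else len(text)": min? is none iff the list is empty
  let right := match PySem.List.min? right_candidates id with
    | some m => m + 1
    | none => PySem.Str.len text
  let left := if left = -1 then 0 else left + 1
  (left, right)

-- ===== PORT B =====
def pvPunct : List Char := ['.', '?', '!']

-- "[i for i, c in enumerate(text) if c in \".?!\"]"
def pvPositions (cs : List Char) : List Int :=
  (PySem.List.enumerate cs).filterMap (fun ic => if ic.2 ∈ pvPunct then some ic.1 else none)

-- "while lo < hi: mid = (lo+hi)//2; if pos[mid] < t: lo = mid+1 else hi = mid"
def pvBisect (pos : List Int) (t : Int) (lo hi : Nat) : Nat :=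
  if h : lo < hi then
    let mid := (lo + hi) / 2
    if pos.getD mid 0 < t then pvBisect pos t (mid + 1) hi
    else pvBisect pos t lo mid
  else lo
termination_by hi - lo
decreasing_by all_goals omega

def sentence_bounds_alt (text : String) (start : Int) (end_ : Int) : Int × Int :=
  let cs := text.toList
  let n : Int := cs.length
  let pos := pvPositions cs
  let s0 := if start < 0 then start + n else start
  let s := if s0 < 0 then 0 else if n < s0 then n else s0
  let e0 := if end_ < 0 then end_ + n else end_
  let e := if e0 < 0 then 0 else if n < e0 then n else e0
  let lo := pvBisect pos s 0 pos.length
  let left : Int := if 0 < lo then pos.getD (lo - 1) 0 + 1 else 0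
  let lo2 := pvBisect pos e 0 pos.length
  let right : Int := if lo2 < pos.length then pos.getD lo2 0 + 1 else n
  (left, right)

-- ===== PRECONDITION & SPEC =====
def Spec_sentence_bounds (text : String) (start : Int) (end_ : Int) (out : Int × Int) : Prop := out = sentence_bounds_alt text start end_
instance (text : String) (start : Int) (end_ : Int) (out : Int × Int) : Decidable (Spec_sentence_bounds text start end_ out) := by unfold Spec_sentence_bounds; infer_instance

-- ===== CLAIM (what is proved, stated in full; the proofs are below) =====
def Claim_equal_sentence_bounds : Prop := ∀ (text : String) (start : Int) (end_ : Int), Dom_sentence_bounds text start end_ → Spec_sentence_bounds text start end_ (sentence_bounds text start end_)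

-- ===== LEMMAS AND PROOFS =====

-- Proof-side reference: the backward scan for the last terminator below m …
def pvScanL (cs : List Char) : Nat → Int
  | 0 => 0
  | i + 1 => if cs.getD i ' ' ∈ pvPunct then ((i : Int) + 1) else pvScanL cs i

-- … and the forward scan for the first terminator at or after j.
def pvScanR : List Char → Nat → Option Nat
  | [], _ => none
  | c :: rest, j => if c ∈ pvPunct then some j else pvScanR rest (j + 1)

-- ---------- A's rfind/find/min? expressions equal the reference scans ----------

-- [c] is a prefix of cs.drop j iff the char at index j is c
theorem pv_prefix_single (cs : List Char) (j : Nat) (hj : j < cs.length) (c : Char) :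
    [c].isPrefixOf (cs.drop j) = (cs.getD j ' ' == c) := by
  rw [List.drop_eq_getElem_cons hj, List.getD_eq_getElem _ _ hj]
  simp [List.isPrefixOf, BEq.comm]

theorem pv_getD_take (cs : List Char) (s i : Nat) (h : i < s) :
    (cs.take s).getD i ' ' = cs.getD i ' ' := by
  by_cases hl : i < cs.length
  · rw [List.getD_eq_getElem _ _ (by rw [List.length_take]; omega),
        List.getD_eq_getElem _ _ hl, List.getElem_take]
  · rw [List.getD_eq_default _ _ (by rw [List.length_take]; omega),
        List.getD_eq_default _ _ (by omega)]

theorem pv_rfind_go_le (T : List Char) (c : Char) (k : Nat) :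
    PySem.Chars.rfind.go T [c] k ≤ (k : Int) := by
  induction k with
  | zero => simp [PySem.Chars.rfind.go]; split <;> simp
  | succ j ih =>
    simp only [PySem.Chars.rfind.go]
    split
    · simp
    · exact le_trans ih (by push_cast; omega)

theorem pv_go3 (cs : List Char) (s : Nat) (hs : s ≤ cs.length) :
    ∀ k, k < s →
    (if max (max (PySem.Chars.rfind.go (cs.take s) ['.'] k)
                 (PySem.Chars.rfind.go (cs.take s) ['?'] k))
            (PySem.Chars.rfind.go (cs.take s) ['!'] k) = -1 then (0 : Int)
     else max (max (PySem.Chars.rfind.go (cs.take s) ['.'] k)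
                   (PySem.Chars.rfind.go (cs.take s) ['?'] k))
              (PySem.Chars.rfind.go (cs.take s) ['!'] k) + 1)
    = pvScanL cs (k + 1) := by
  intro k
  induction k with
  | zero =>
    intro hk
    have hT : (0:Nat) < (cs.take s).length := by rw [List.length_take]; omega
    have hunf : ∀ c : Char, PySem.Chars.rfind.go (cs.take s) [c] 0
        = if cs.getD 0 ' ' = c then (0:Int) else -1 := by
      intro c
      have hp := pv_prefix_single (cs.take s) 0 hT c
      rw [List.drop_zero, pv_getD_take cs s 0 (by omega)] at hp
      simp only [PySem.Chars.rfind.go, hp, beq_iff_eq]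
    rw [hunf '.', hunf '?', hunf '!',
        show pvScanL cs (0 + 1) = if cs.getD 0 ' ' ∈ pvPunct then ((0 : Int) + 1) else pvScanL cs 0 from rfl,
        show pvScanL cs 0 = 0 from rfl]
    set a := cs.getD 0 ' ' with ha
    by_cases h1 : a = '.'
    · rw [h1]; decide
    · by_cases h2 : a = '?'
      · rw [h2]; decide
      · by_cases h3 : a = '!'
        · rw [h3]; decide
        · have hmem : a ∉ pvPunct := by simp [pvPunct, h1, h2, h3]
          rw [if_neg h1, if_neg h2, if_neg h3, if_neg hmem]
          decide
  | succ j ih =>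
    intro hk
    have hij : j + 1 < (cs.take s).length := by rw [List.length_take]; omega
    have hle1 := pv_rfind_go_le (cs.take s) '.' j
    have hle2 := pv_rfind_go_le (cs.take s) '?' j
    have hle3 := pv_rfind_go_le (cs.take s) '!' j
    have hunf : ∀ c : Char, PySem.Chars.rfind.go (cs.take s) [c] (j + 1)
        = if cs.getD (j+1) ' ' = c then ((j:Int)+1) else PySem.Chars.rfind.go (cs.take s) [c] j := by
      intro c
      have hp := pv_prefix_single (cs.take s) (j+1) hij c
      rw [pv_getD_take cs s (j+1) (by omega)] at hp
      simp only [PySem.Chars.rfind.go, hp, beq_iff_eq]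
      push_cast
      rfl
    rw [hunf '.', hunf '?', hunf '!',
        show pvScanL cs (j + 1 + 1) = if cs.getD (j+1) ' ' ∈ pvPunct then (((j:Int)+1) + 1) else pvScanL cs (j+1) from rfl]
    set a := cs.getD (j+1) ' ' with ha
    by_cases h1 : a = '.'
    · have n2 : ¬(a = '?') := by rw [h1]; decide
      have n3 : ¬(a = '!') := by rw [h1]; decide
      have hmem : a ∈ pvPunct := by rw [h1]; decide
      rw [if_pos h1, if_neg n2, if_neg n3, if_pos hmem,
          max_eq_left (le_trans hle2 (by omega)), max_eq_left (le_trans hle3 (by omega)),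
          if_neg (show ¬((j:Int)+1 = -1) by omega)]
    · by_cases h2 : a = '?'
      · have n3 : ¬(a = '!') := by rw [h2]; decide
        have hmem : a ∈ pvPunct := by rw [h2]; decide
        rw [if_neg h1, if_pos h2, if_neg n3, if_pos hmem,
            max_eq_right (le_trans hle1 (by omega)), max_eq_left (le_trans hle3 (by omega)),
            if_neg (show ¬((j:Int)+1 = -1) by omega)]
      · by_cases h3 : a = '!'
        · have hmem : a ∈ pvPunct := by rw [h3]; decide
          rw [if_neg h1, if_neg h2, if_pos h3, if_pos hmem,
              max_eq_right (max_le (le_trans hle1 (by omega)) (le_trans hle2 (by omega))),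
              if_neg (show ¬((j:Int)+1 = -1) by omega)]
        · have hmem : a ∉ pvPunct := by simp [pvPunct, h1, h2, h3]
          rw [if_neg h1, if_neg h2, if_neg h3, if_neg hmem]
          exact ih (by omega)

theorem pv_left_core (cs : List Char) (s : Nat) (hs : s ≤ cs.length) :
    (if max (max (PySem.Chars.rfind (cs.take s) ['.'])
                 (PySem.Chars.rfind (cs.take s) ['?']))
            (PySem.Chars.rfind (cs.take s) ['!']) = -1 then (0 : Int)
     else max (max (PySem.Chars.rfind (cs.take s) ['.'])
                   (PySem.Chars.rfind (cs.take s) ['?']))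
              (PySem.Chars.rfind (cs.take s) ['!']) + 1)
    = pvScanL cs s := by
  have hlen : (cs.take s).length = s := by rw [List.length_take]; omega
  simp only [PySem.Chars.rfind, hlen]
  cases s with
  | zero => rw [List.take_zero, show pvScanL cs 0 = 0 from rfl]; decide
  | succ s' =>
    have hdrop : (cs.take (s'+1)).drop (s'+1) = [] := by
      apply List.drop_eq_nil_of_le; omega
    have hstep : ∀ c : Char, PySem.Chars.rfind.go (cs.take (s'+1)) [c] (s'+1)
        = PySem.Chars.rfind.go (cs.take (s'+1)) [c] s' := by
      intro c
      simp only [PySem.Chars.rfind.go, hdrop]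
      simp
    rw [hstep '.', hstep '?', hstep '!']
    exact pv_go3 cs (s'+1) hs s' (by omega)

theorem pv_find_go_shift (c : Char) : ∀ (M : List Char) (k : Nat),
    PySem.Chars.find.go [c] M k
      = if PySem.Chars.find.go [c] M 0 = -1 then -1 else PySem.Chars.find.go [c] M 0 + k := by
  intro M
  induction M with
  | nil => intro k; simp [PySem.Chars.find.go]
  | cons b T ih =>
    intro k
    simp only [PySem.Chars.find.go]
    by_cases hp : [c].isPrefixOf (b :: T)
    · simp [hp]
    · have h1 := ih (k + 1)
      have h2 := ih 1
      simp only [hp, if_false, Bool.false_eq_true] at *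
      by_cases h0 : PySem.Chars.find.go [c] T 0 = -1
      · simp [h0] at *; omega
      · have hge : -1 ≤ PySem.Chars.find.go [c] T 0 := by
          have := PySem.Chars.neg_one_le_find T [c]
          simpa [PySem.Chars.find] using this
        rw [h1, h2]
        simp [h0]
        split_ifs <;> omega

theorem pv_find_cons (a : Char) (M : List Char) (c : Char) :
    PySem.Chars.find (a :: M) [c]
      = if a = c then 0
        else if PySem.Chars.find M [c] = -1 then -1 else PySem.Chars.find M [c] + 1 := by
  simp only [PySem.Chars.find, PySem.Chars.find.go]
  have hp : [c].isPrefixOf (a :: M) = (a == c) := by simp [List.isPrefixOf, BEq.comm]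
  rw [hp]
  by_cases h : a = c
  · simp [h]
  · simp only [h, beq_iff_eq, if_false]
    rw [pv_find_go_shift c M 1]
    simp

-- first-extremal min? of the filtered three-element candidate list
theorem pv_min3 (x y z m : Int) (h0 : 0 ≤ m) (hmem : m = x ∨ m = y ∨ m = z)
    (hx : x = -1 ∨ m ≤ x) (hy : y = -1 ∨ m ≤ y) (hz : z = -1 ∨ m ≤ z) :
    PySem.List.min? (([x, y, z]).filter (fun c => c ≠ -1)) id = some m := by
  have hmf : m ∈ ([x, y, z]).filter (fun c => c ≠ -1) := by
    simp only [List.mem_filter, List.mem_cons, List.not_mem_nil, or_false]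
    constructor
    · tauto
    · simp; omega
  cases hmin : PySem.List.min? (([x, y, z]).filter (fun c => c ≠ -1)) id with
  | none =>
    rw [PySem.List.min?_eq_none_iff] at hmin
    rw [hmin] at hmf
    simp at hmf
  | some m' =>
    have hm'mem := PySem.List.min?_mem hmin
    have hle := PySem.List.min?_isMin hmin m hmf
    simp only [List.mem_filter, List.mem_cons, List.not_mem_nil, or_false] at hm'mem
    obtain ⟨hm'or, hm'ne⟩ := hm'mem
    simp only [ne_eq, decide_eq_true_eq] at hm'ne
    have : m ≤ m' := by rcases hm'or with h|h|h <;> subst h <;> omega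
    simp only [id] at hle
    rw [le_antisymm hle this]

theorem pv_cand_eq (k : Nat) (r : Int) (hr : -1 ≤ r) :
    (if (if r = -1 then (-1:Int) else r + 1) = -1 then (-1:Int)
     else (k:Int) + (if r = -1 then (-1:Int) else r + 1))
    = if r = -1 then (-1:Int) else ((k+1 : Nat):Int) + r := by
  by_cases h : r = -1
  · simp [h]
  · rw [if_neg h, if_neg (show ¬(r + 1 = -1) by omega), if_neg h]
    push_cast
    ring

theorem pv_cand_bound (k : Nat) (r : Int) (hr : -1 ≤ r) :
    (if (if r = -1 then (-1:Int) else r + 1) = -1 then (-1:Int)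
     else (k:Int) + (if r = -1 then (-1:Int) else r + 1))
    = -1 ∨ (k:Int) < (if (if r = -1 then (-1:Int) else r + 1) = -1 then (-1:Int)
     else (k:Int) + (if r = -1 then (-1:Int) else r + 1)) := by
  by_cases h : r = -1
  · simp [h]
  · rw [if_neg h, if_neg (show ¬(r + 1 = -1) by omega)]
    right; omega

-- core right lemma: min over the three found candidates agrees with the forward scan
theorem pv_find3_scan (M : List Char) (k : Nat) (d : Int) :
    (match PySem.List.min?
        (([if PySem.Chars.find M ['.'] = -1 then (-1 : Int) else (k : Int) + PySem.Chars.find M ['.'],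
           if PySem.Chars.find M ['?'] = -1 then (-1 : Int) else (k : Int) + PySem.Chars.find M ['?'],
           if PySem.Chars.find M ['!'] = -1 then (-1 : Int) else (k : Int) + PySem.Chars.find M ['!']]).filter
            (fun c => c ≠ -1)) id with
     | some m => m + 1
     | none => d)
    = (match pvScanR M k with | some j => (j : Int) + 1 | none => d) := by
  induction M generalizing k with
  | nil =>
    have hnil : ∀ c : Char, PySem.Chars.find ([] : List Char) [c] = -1 := by
      intro c; simp [PySem.Chars.find, PySem.Chars.find.go]
    simp [hnil, pvScanR, PySem.List.min?, List.filter]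
  | cons a M' ih =>
    have hb1 := PySem.Chars.neg_one_le_find M' ['.']
    have hb2 := PySem.Chars.neg_one_le_find M' ['?']
    have hb3 := PySem.Chars.neg_one_le_find M' ['!']
    rw [pv_find_cons a M' '.', pv_find_cons a M' '?', pv_find_cons a M' '!',
        show pvScanR (a :: M') k = if a ∈ pvPunct then some k else pvScanR M' (k + 1) from rfl]
    by_cases h1 : a = '.'
    · have n2 : ¬(a = '?') := by rw [h1]; decide
      have n3 : ¬(a = '!') := by rw [h1]; decide
      have hmem : a ∈ pvPunct := by rw [h1]; decide
      rw [if_pos h1, if_neg n2, if_neg n3, if_pos hmem,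
          show (if (0:Int) = -1 then (-1:Int) else (k:Int) + 0) = (k:Int) by norm_num,
          pv_min3 _ _ _ ((k:Int)) (by omega) (Or.inl rfl) (Or.inr le_rfl)
            (by rcases pv_cand_bound k _ hb2 with h | h; exact Or.inl h; exact Or.inr (by omega))
            (by rcases pv_cand_bound k _ hb3 with h | h; exact Or.inl h; exact Or.inr (by omega))]
    · by_cases h2 : a = '?'
      · have n3 : ¬(a = '!') := by rw [h2]; decide
        have hmem : a ∈ pvPunct := by rw [h2]; decide
        rw [if_neg h1, if_pos h2, if_neg n3, if_pos hmem,
            show (if (0:Int) = -1 then (-1:Int) else (k:Int) + 0) = (k:Int) by norm_num,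
            pv_min3 _ _ _ ((k:Int)) (by omega)
              (Or.inr (Or.inl rfl))
              (by rcases pv_cand_bound k _ hb1 with h | h; exact Or.inl h; exact Or.inr (by omega))
              (Or.inr le_rfl)
              (by rcases pv_cand_bound k _ hb3 with h | h; exact Or.inl h; exact Or.inr (by omega))]
      · by_cases h3 : a = '!'
        · have hmem : a ∈ pvPunct := by rw [h3]; decide
          rw [if_neg h1, if_neg h2, if_pos h3, if_pos hmem,
              show (if (0:Int) = -1 then (-1:Int) else (k:Int) + 0) = (k:Int) by norm_num,
              pv_min3 _ _ _ ((k:Int)) (by omega)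
                (Or.inr (Or.inr rfl))
                (by rcases pv_cand_bound k _ hb1 with h | h; exact Or.inl h; exact Or.inr (by omega))
                (by rcases pv_cand_bound k _ hb2 with h | h; exact Or.inl h; exact Or.inr (by omega))
                (Or.inr le_rfl)]
        · have hmem : a ∉ pvPunct := by simp [pvPunct, h1, h2, h3]
          rw [if_neg h1, if_neg h2, if_neg h3, if_neg hmem,
              pv_cand_eq k _ hb1, pv_cand_eq k _ hb2, pv_cand_eq k _ hb3,
              ih (k + 1)]

-- normalization of rfindFrom(sub, 0, start) to rfind on the clamped prefix
theorem pv_rfindFrom_norm (cs : List Char) (start : Int) (c : Char) (s : Nat)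
    (hs : (s:Int) = if (if start < 0 then start + (cs.length:Int) else start) < 0 then 0
          else if (cs.length:Int) < (if start < 0 then start + (cs.length:Int) else start) then (cs.length:Int)
          else (if start < 0 then start + (cs.length:Int) else start)) :
    PySem.Chars.rfindFrom cs [c] 0 (some start) = PySem.Chars.rfind (cs.take s) [c] := by
  simp only [PySem.Chars.rfindFrom]
  have hst : (if (0:Int) < 0 then if 0 + (cs.length:Int) < 0 then 0 else 0 + (cs.length:Int) else (0:Int)) = 0 := by
    norm_num
  rw [hst]
  have hE : (if (cs.length:Int) < start then (cs.length:Int)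
      else if start < 0 then if start + (cs.length:Int) < 0 then 0 else start + (cs.length:Int) else start)
      = (s:Int) := by
    split_ifs at hs ⊢ <;> omega
  rw [hE, if_neg (show ¬ (s:Int) < 0 by omega)]
  simp only [Int.toNat_zero, List.drop_zero, Int.toNat_natCast]
  split_ifs with h
  · exact h.symm
  · exact zero_add _

theorem pv_findFrom_big (cs : List Char) (end_ : Int) (c : Char) (h : (cs.length:Int) < end_) :
    PySem.Chars.findFrom cs [c] end_ none = -1 := by
  simp only [PySem.Chars.findFrom]
  rw [if_pos]
  split_ifs <;> omega

theorem pv_findFrom_norm (cs : List Char) (end_ : Int) (c : Char) (e : Nat)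
    (hle : end_ ≤ (cs.length:Int))
    (he : (e:Int) = if (if end_ < 0 then end_ + (cs.length:Int) else end_) < 0 then 0
          else if (cs.length:Int) < (if end_ < 0 then end_ + (cs.length:Int) else end_) then (cs.length:Int)
          else (if end_ < 0 then end_ + (cs.length:Int) else end_)) :
    PySem.Chars.findFrom cs [c] end_ none
      = if PySem.Chars.find (cs.drop e) [c] = -1 then -1
        else (e:Int) + PySem.Chars.find (cs.drop e) [c] := by
  simp only [PySem.Chars.findFrom]
  have hE : (if end_ < 0 then if end_ + (cs.length:Int) < 0 then 0 else end_ + (cs.length:Int) else end_)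
      = (e:Int) := by
    split_ifs at he ⊢ <;> omega
  have he' : (e:Int) ≤ (cs.length:Int) := by split_ifs at he <;> omega
  rw [hE, if_neg (show ¬ (cs.length:Int) < (e:Int) by omega)]
  simp only [Int.toNat_natCast, List.take_length]

-- ---------- B's punctuation index and binary search equal the reference scans ----------

-- membership characterization of the position index
theorem pv_pos_mem (cs : List Char) (x : Int) :
    x ∈ pvPositions cs ↔ ∃ k : Nat, k < cs.length ∧ x = (k:Int) ∧ cs.getD k ' ' ∈ pvPunct := by
  simp only [pvPositions, List.mem_filterMap, PySem.List.mem_enumerate_iff]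
  constructor
  · rintro ⟨p, ⟨k, hk, rfl⟩, hif⟩
    by_cases hmem : cs[k] ∈ pvPunct
    · rw [if_pos hmem, Option.some.injEq] at hif
      exact ⟨k, hk, by omega, by rw [List.getD_eq_getElem _ _ hk]; exact hmem⟩
    · rw [if_neg hmem] at hif; cases hif
  · rintro ⟨k, hk, hx, hp⟩
    refine ⟨((k:Int), cs[k]), ⟨k, hk, by simp⟩, ?_⟩
    rw [List.getD_eq_getElem _ _ hk] at hp
    rw [if_pos hp, hx]

theorem pv_pos_sorted (cs : List Char) : (pvPositions cs).Pairwise (· < ·) := by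
  apply List.Pairwise.filterMap (R := fun (p q : Int × Char) => p.1 < q.1)
  · intro a a' hR b hb b' hb'
    by_cases h1 : a.2 ∈ pvPunct
    · by_cases h2 : a'.2 ∈ pvPunct
      · rw [if_pos h1, Option.some.injEq] at hb
        rw [if_pos h2, Option.some.injEq] at hb'
        rw [← hb, ← hb']; exact hR
      · rw [if_neg h2] at hb'; cases hb'
    · rw [if_neg h1] at hb; cases hb
  · exact PySem.List.pairwise_lt_enumerate cs 0

theorem pv_pos_mono (cs : List Char) (i j : Nat) (hij : i ≤ j) (hj : j < (pvPositions cs).length) :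
    (pvPositions cs).getD i 0 ≤ (pvPositions cs).getD j 0 := by
  rcases Nat.lt_or_ge i j with h | h
  · rw [List.getD_eq_getElem _ _ (by omega), List.getD_eq_getElem _ _ hj]
    exact le_of_lt ((List.pairwise_iff_getElem.mp (pv_pos_sorted cs)) i j (by omega) hj h)
  · have : i = j := by omega
    rw [this]

-- the binary-search loop returns the boundary between elements < t and elements ≥ t
theorem pv_bisect_inv (pos : List Int) (t : Int) (hsort : pos.Pairwise (· < ·)) :
    ∀ (n lo hi : Nat), hi - lo ≤ n → lo ≤ hi → hi ≤ pos.length →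
    (∀ j, j < lo → pos.getD j 0 < t) →
    (∀ j, hi ≤ j → j < pos.length → t ≤ pos.getD j 0) →
    pvBisect pos t lo hi ≤ pos.length ∧
    (∀ j, j < pvBisect pos t lo hi → pos.getD j 0 < t) ∧
    (∀ j, pvBisect pos t lo hi ≤ j → j < pos.length → t ≤ pos.getD j 0) := by
  have mono : ∀ i j : Nat, i ≤ j → j < pos.length → pos.getD i 0 ≤ pos.getD j 0 := by
    intro i j hij hj
    rcases Nat.lt_or_ge i j with h | h
    · rw [List.getD_eq_getElem _ _ (by omega), List.getD_eq_getElem _ _ hj]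
      exact le_of_lt ((List.pairwise_iff_getElem.mp hsort) i j (by omega) hj h)
    · have : i = j := by omega
      rw [this]
  intro n
  induction n with
  | zero =>
    intro lo hi hn hlohi hhi hlo hge
    have : lo = hi := by omega
    rw [pvBisect, dif_neg (by omega)]
    exact ⟨by omega, hlo, by subst this; exact hge⟩
  | succ n ih =>
    intro lo hi hn hlohi hhi hlo hge
    rw [pvBisect]
    by_cases h : lo < hi
    · rw [dif_pos h]
      simp only []
      by_cases hc : pos.getD ((lo + hi) / 2) 0 < t
      · rw [if_pos hc]
        apply ih ((lo + hi) / 2 + 1) hi (by omega) (by omega) hhi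
        · intro j hj
          rcases Nat.lt_or_ge j lo with hjl | hjl
          · exact hlo j hjl
          · exact lt_of_le_of_lt (mono j ((lo + hi) / 2) (by omega) (by omega)) hc
        · exact hge
      · rw [if_neg hc]
        apply ih lo ((lo + hi) / 2) (by omega) (by omega) (by omega) hlo
        intro j hj hjlen
        exact le_trans (le_of_not_gt hc) (mono ((lo + hi) / 2) j hj hjlen)
    · rw [dif_neg h]
      have : lo = hi := by omega
      exact ⟨by omega, hlo, by subst this; exact hge⟩

-- backward-scan facts
theorem pv_scanL_zero (cs : List Char) (m : Nat)
    (h : ∀ k, k < m → cs.getD k ' ' ∉ pvPunct) : pvScanL cs m = 0 := by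
  induction m with
  | zero => rfl
  | succ i ih =>
    rw [show pvScanL cs (i+1) = if cs.getD i ' ' ∈ pvPunct then ((i : Int) + 1) else pvScanL cs i from rfl,
        if_neg (h i (by omega))]
    exact ih (fun k hk => h k (by omega))

theorem pv_scanL_last (cs : List Char) (p m : Nat)
    (hp : cs.getD p ' ' ∈ pvPunct) (hpm : p < m)
    (hno : ∀ k, p < k → k < m → cs.getD k ' ' ∉ pvPunct) :
    pvScanL cs m = (p : Int) + 1 := by
  induction m with
  | zero => omega
  | succ i ih =>
    rw [show pvScanL cs (i+1) = if cs.getD i ' ' ∈ pvPunct then ((i : Int) + 1) else pvScanL cs i from rfl]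
    by_cases he : p = i
    · rw [he] at hp
      rw [if_pos hp, he]
    · have hpi : p < i := by omega
      rw [if_neg (hno i (by omega) (by omega))]
      exact ih hpi (fun k h1 h2 => hno k h1 (by omega))

-- forward-scan facts
theorem pv_scanR_none (M : List Char) (j : Nat) (h : ∀ c ∈ M, c ∉ pvPunct) :
    pvScanR M j = none := by
  induction M generalizing j with
  | nil => rfl
  | cons a T ih =>
    rw [show pvScanR (a :: T) j = if a ∈ pvPunct then some j else pvScanR T (j + 1) from rfl,
        if_neg (h a (by simp))]
    exact ih (j+1) (fun c hc => h c (by simp [hc]))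

theorem pv_scanR_first (cs : List Char) (q : Nat) (hq : q < cs.length)
    (hp : cs.getD q ' ' ∈ pvPunct) :
    ∀ (d m : Nat), q - m = d → m ≤ q →
    (∀ k, m ≤ k → k < q → cs.getD k ' ' ∉ pvPunct) →
    pvScanR (cs.drop m) m = some q := by
  intro d
  induction d with
  | zero =>
    intro m hd hm _
    have : m = q := by omega
    subst this
    rw [List.drop_eq_getElem_cons hq,
        show pvScanR (cs[m] :: cs.drop (m+1)) m
          = if cs[m] ∈ pvPunct then some m else pvScanR (cs.drop (m+1)) (m + 1) from rfl,
        if_pos (by rw [← List.getD_eq_getElem cs ' ' hq]; exact hp)]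
  | succ d ih =>
    intro m hd hm hno
    have hmlen : m < cs.length := by omega
    rw [List.drop_eq_getElem_cons hmlen,
        show pvScanR (cs[m] :: cs.drop (m+1)) m
          = if cs[m] ∈ pvPunct then some m else pvScanR (cs.drop (m+1)) (m + 1) from rfl,
        if_neg (by rw [← List.getD_eq_getElem cs ' ' hmlen]; exact hno m (by omega) (by omega))]
    exact ih (m+1) (by omega) (by omega) (fun k h1 h2 => hno k (by omega) h2)

-- B's left value equals the backward scan
theorem pv_B_left (cs : List Char) (s : Int) (h0 : 0 ≤ s) (hn : s ≤ (cs.length : Int)) :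
    (if 0 < pvBisect (pvPositions cs) s 0 (pvPositions cs).length
     then (pvPositions cs).getD (pvBisect (pvPositions cs) s 0 (pvPositions cs).length - 1) 0 + 1
     else 0)
    = pvScanL cs s.toNat := by
  set pos := pvPositions cs with hpos
  set r := pvBisect pos s 0 pos.length with hr
  obtain ⟨hrlen, hlt, hge⟩ :=
    pv_bisect_inv pos s (pv_pos_sorted cs) pos.length 0 pos.length (by omega) (by omega)
      (le_refl _) (fun j hj => absurd hj (by omega)) (fun j hj hjl => absurd hjl (by omega))
  by_cases hr0 : 0 < r
  · rw [if_pos hr0]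
    have hr1 : r - 1 < pos.length := by omega
    have hmem : pos.getD (r-1) 0 ∈ pos := by
      rw [List.getD_eq_getElem _ _ hr1]; exact List.getElem_mem hr1
    obtain ⟨k, hk, hkx, hkp⟩ := (pv_pos_mem cs _).mp hmem
    have hklt : (k : Int) < s := by rw [← hkx]; exact hlt (r-1) (by omega)
    have hno : ∀ k', k < k' → k' < s.toNat → cs.getD k' ' ' ∉ pvPunct := by
      intro k' h1 h2 hpk'
      have hk'len : k' < cs.length := by omega
      have : (k' : Int) ∈ pos := (pv_pos_mem cs _).mpr ⟨k', hk'len, rfl, hpk'⟩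
      obtain ⟨j, hj, hjx⟩ := List.mem_iff_getElem.mp this
      have hjD : pos.getD j 0 = (k' : Int) := by rw [List.getD_eq_getElem _ _ hj, hjx]
      rcases Nat.lt_or_ge j r with hjr | hjr
      · have : pos.getD j 0 ≤ pos.getD (r-1) 0 := pv_pos_mono cs j (r-1) (by omega) hr1
        rw [hjD, hkx] at this
        omega
      · have := hge j hjr hj
        rw [hjD] at this
        omega
    rw [hkx, pv_scanL_last cs k s.toNat hkp (by omega) hno]
  · rw [if_neg hr0]
    refine (pv_scanL_zero cs s.toNat ?_).symm
    intro k hk hpk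
    have hklen : k < cs.length := by omega
    have : (k : Int) ∈ pos := (pv_pos_mem cs _).mpr ⟨k, hklen, rfl, hpk⟩
    obtain ⟨j, hj, hjx⟩ := List.mem_iff_getElem.mp this
    have := hge j (by omega) hj
    rw [List.getD_eq_getElem _ _ hj, hjx] at this
    omega

-- B's right value equals the forward scan
theorem pv_B_right (cs : List Char) (e : Int) (h0 : 0 ≤ e) (hn : e ≤ (cs.length : Int)) :
    (if pvBisect (pvPositions cs) e 0 (pvPositions cs).length < (pvPositions cs).length
     then (pvPositions cs).getD (pvBisect (pvPositions cs) e 0 (pvPositions cs).length) 0 + 1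
     else (cs.length : Int))
    = (match pvScanR (cs.drop e.toNat) e.toNat with
       | some j => (j : Int) + 1
       | none => (cs.length : Int)) := by
  set pos := pvPositions cs with hpos
  set r := pvBisect pos e 0 pos.length with hr
  obtain ⟨hrlen, hlt, hge⟩ :=
    pv_bisect_inv pos e (pv_pos_sorted cs) pos.length 0 pos.length (by omega) (by omega)
      (le_refl _) (fun j hj => absurd hj (by omega)) (fun j hj hjl => absurd hjl (by omega))
  by_cases hcase : r < pos.length
  · rw [if_pos hcase]
    have hmem : pos.getD r 0 ∈ pos := by
      rw [List.getD_eq_getElem _ _ hcase]; exact List.getElem_mem hcase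
    obtain ⟨k, hk, hkx, hkp⟩ := (pv_pos_mem cs _).mp hmem
    have hke : e ≤ (k : Int) := by rw [← hkx]; exact hge r (le_refl _) hcase
    rw [pv_scanR_first cs k hk hkp (k - e.toNat) e.toNat rfl (by omega) ?_]
    · rw [hkx]
    · intro k' h1 h2 hpk'
      have hk'len : k' < cs.length := by omega
      have : (k' : Int) ∈ pos := (pv_pos_mem cs _).mpr ⟨k', hk'len, rfl, hpk'⟩
      obtain ⟨j, hj, hjx⟩ := List.mem_iff_getElem.mp this
      have hjD : pos.getD j 0 = (k' : Int) := by rw [List.getD_eq_getElem _ _ hj, hjx]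
      rcases Nat.lt_or_ge j r with hjr | hjr
      · have := hlt j hjr
        rw [hjD] at this
        omega
      · have : pos.getD r 0 ≤ pos.getD j 0 := pv_pos_mono cs r j hjr hj
        rw [hjD, hkx] at this
        omega
  · rw [if_neg hcase]
    rw [pv_scanR_none (cs.drop e.toNat) e.toNat ?_]
    intro c hc hpc
    obtain ⟨i, hi, hix⟩ := List.mem_iff_getElem.mp hc
    rw [List.getElem_drop] at hix
    have hilen : e.toNat + i < cs.length := by
      rw [List.length_drop] at hi
      omega
    have hpidx : cs.getD (e.toNat + i) ' ' ∈ pvPunct := by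
      rw [List.getD_eq_getElem _ _ hilen, hix]; exact hpc
    have : ((e.toNat + i : Nat) : Int) ∈ pos := (pv_pos_mem cs _).mpr ⟨_, hilen, rfl, hpidx⟩
    obtain ⟨j, hj, hjx⟩ := List.mem_iff_getElem.mp this
    have := hlt j (by omega)
    rw [List.getD_eq_getElem _ _ hj, hjx] at this
    omega

theorem pv_main (text : String) (start : Int) (end_ : Int) :
    sentence_bounds text start end_ = sentence_bounds_alt text start end_ := by
  unfold sentence_bounds sentence_bounds_alt
  simp only [PySem.Str.rfindFrom_eq, PySem.Str.findFrom_eq, PySem.Str.len_eq]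
  rw [show (".".toList) = ['.'] by decide, show ("?".toList) = ['?'] by decide,
      show ("!".toList) = ['!'] by decide]
  set cs := text.toList with hcs
  set N : Int := (cs.length : Int) with hN
  have hN0 : 0 ≤ N := by rw [hN]; positivity
  set sE : Int := (if (if start < 0 then start + N else start) < 0 then 0
      else if N < (if start < 0 then start + N else start) then N
      else (if start < 0 then start + N else start)) with hsE
  set eE : Int := (if (if end_ < 0 then end_ + N else end_) < 0 then 0
      else if N < (if end_ < 0 then end_ + N else end_) then N
      else (if end_ < 0 then end_ + N else end_)) with heE
  have hs0 : 0 ≤ sE := by rw [hsE]; split_ifs <;> omega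
  have hsN : sE ≤ N := by rw [hsE]; split_ifs <;> omega
  have he0 : 0 ≤ eE := by rw [heE]; split_ifs <;> omega
  have heN : eE ≤ N := by rw [heE]; split_ifs <;> omega
  have hsInt : ((sE.toNat : Nat) : Int) = sE := Int.toNat_of_nonneg hs0
  have heInt : ((eE.toNat : Nat) : Int) = eE := Int.toNat_of_nonneg he0
  rw [Prod.mk.injEq]
  constructor
  · -- left component
    rw [pv_rfindFrom_norm cs start '.' sE.toNat (by rw [hsInt, hsE, hN]),
        pv_rfindFrom_norm cs start '?' sE.toNat (by rw [hsInt, hsE, hN]),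
        pv_rfindFrom_norm cs start '!' sE.toNat (by rw [hsInt, hsE, hN]),
        pv_left_core cs sE.toNat (by omega), ← pv_B_left cs sE hs0 (by omega)]
  · -- right component
    by_cases hbig : N < end_
    · rw [pv_findFrom_big cs end_ '.' (by rw [← hN]; exact hbig),
          pv_findFrom_big cs end_ '?' (by rw [← hN]; exact hbig),
          pv_findFrom_big cs end_ '!' (by rw [← hN]; exact hbig)]
      have hEN : eE = N := by rw [heE]; split_ifs <;> omega
      have hdropE : cs.drop eE.toNat = [] := by
        apply List.drop_eq_nil_of_le
        omega
      rw [show ([(-1:Int), -1, -1].filter (fun c => c ≠ -1)) = [] by decide]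
      rw [show (PySem.List.min? ([] : List Int) id) = none from rfl]
      have hB := pv_B_right cs eE he0 (by omega)
      rw [hdropE, pv_scanR_none [] eE.toNat (by intro c hc; cases hc), ← hN] at hB
      exact hB.symm
    · have hle : end_ ≤ (cs.length : Int) := by rw [← hN]; omega
      rw [pv_findFrom_norm cs end_ '.' eE.toNat hle (by rw [heInt, heE, hN]),
          pv_findFrom_norm cs end_ '?' eE.toNat hle (by rw [heInt, heE, hN]),
          pv_findFrom_norm cs end_ '!' eE.toNat hle (by rw [heInt, heE, hN]),
          pv_find3_scan (cs.drop eE.toNat) eE.toNat N]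
      have hB := pv_B_right cs eE he0 (by omega)
      rw [← hN] at hB
      exact hB.symm

-- ===== VERDICT (by name: the statement is the Claim_ definition above) =====
theorem sentence_bounds_spec : Claim_equal_sentence_bounds := by
  intro text start end_ _
  unfold Spec_sentence_bounds
  exact pv_main text start end_
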